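-- pv_equiv track=rewrite | github.com/open-experiments/aiops-nextgen | src/api-gateway/app/middleware/validation.py | _path_matches_pattern
-- ===== SOURCE A (Python) =====
-- def _path_matches_pattern(path: str, pattern: str) -> bool:
--     """Check if path matches pattern with placeholders."""
--     path_parts = path.split("/")
--     pattern_parts = pattern.split("/")
--
--     if len(path_parts) != len(pattern_parts):
--         return False
--
--     for path_part, pattern_part in zip(path_parts, pattern_parts, strict=True):
--         if pattern_part.startswith("{") and pattern_part.endswith("}"):
--             continue  # Placeholder matches anything
--         if path_part != pattern_part:
--             return False
--
--     return True
-- ===== SOURCE B (Python) =====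
-- def _seg_ok(seg: str, pat: str) -> bool:
--     return (pat.startswith("{") and pat.endswith("}")) or seg == pat
--
--
-- def _path_matches_pattern(path: str, pattern: str) -> bool:
--     """Consume one segment at a time from both strings; no split lists, no length pre-check."""
--     while True:
--         i = path.find("/")
--         j = pattern.find("/")
--         if (i < 0) != (j < 0):
--             return False  # one side has more segments left than the other
--         if i < 0:
--             return _seg_ok(path, pattern)
--         if not _seg_ok(path[:i], pattern[:j]):
--             return False
--         path, pattern = path[i + 1:], pattern[j + 1:]
-- ===== Notes on version B (the rewrite author's own statement) =====
-- stated objective: alternative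
-- what changed: Instead of splitting both strings into segment lists, checking lengths, and looping over the zipped pairs, B consumes one segment at a time from both strings in a single while loop (find the next '/', compare or accept placeholder, cut it off), so no lists are built and the length check is implicit in the simultaneous consumption.
import Mathlib
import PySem

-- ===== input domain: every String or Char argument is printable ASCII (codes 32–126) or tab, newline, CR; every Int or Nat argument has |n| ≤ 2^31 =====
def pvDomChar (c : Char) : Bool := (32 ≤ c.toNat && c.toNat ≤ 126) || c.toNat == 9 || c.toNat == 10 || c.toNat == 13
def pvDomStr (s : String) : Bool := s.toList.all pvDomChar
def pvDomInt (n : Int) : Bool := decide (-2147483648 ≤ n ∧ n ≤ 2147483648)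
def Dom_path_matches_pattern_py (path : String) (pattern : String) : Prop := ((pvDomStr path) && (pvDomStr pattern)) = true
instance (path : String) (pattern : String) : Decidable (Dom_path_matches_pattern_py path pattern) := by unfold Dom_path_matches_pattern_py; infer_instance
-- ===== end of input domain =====

-- B consumes one segment at a time from both strings in a single loop (find '/' , compare or
-- accept placeholder, cut the segment off) instead of A's split-into-lists + length check + zip loop.

-- ===== PORT A =====
-- the for-loop over zip(path_parts, pattern_parts): branches in A's order
def pvALoop : List (List Char × List Char) → Bool
  | [] => true
  | (pathPart, patternPart) :: rest =>
      if PySem.Chars.startswith patternPart ['{'] && PySem.Chars.endswith patternPart ['}'] then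
        pvALoop rest          -- placeholder matches anything: continue
      else if pathPart ≠ patternPart then false
      else pvALoop rest

def path_matches_pattern_py (path : String) (pattern : String) : Bool :=
  let pathParts := PySem.Chars.splitOn path.toList ['/']       -- path.split("/")
  let patternParts := PySem.Chars.splitOn pattern.toList ['/'] -- pattern.split("/")
  if pathParts.length ≠ patternParts.length then false
  else pvALoop (pathParts.zip patternParts)

-- ===== PORT B =====
-- termination fact for pvBLoop: a found '/' means the string is nonempty
lemma pvFind_nonneg_ne_nil (p : List Char) (h : 0 ≤ PySem.Chars.find p ['/']) : p ≠ [] := by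
  intro he; subst he
  have := (PySem.Chars.find_nonneg_iff (s := []) (sub := ['/'])).mp h
  simp at this

def pvSegOk (seg pat : List Char) : Bool :=
  (PySem.Chars.startswith pat ['{'] && PySem.Chars.endswith pat ['}']) || seg == pat

-- the while loop of B; path[:i] / path[i+1:] with 0 ≤ i < len are List.take i / List.drop (i+1) (exact here)
def pvBLoop (p q : List Char) : Bool :=
  let i := PySem.Chars.find p ['/']
  let j := PySem.Chars.find q ['/']
  if (decide (i < 0)) != (decide (j < 0)) then false
  else if i < 0 then pvSegOk p q
  else if ! pvSegOk (p.take i.toNat) (q.take j.toNat) then false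
  else pvBLoop (p.drop (i.toNat + 1)) (q.drop (j.toNat + 1))
termination_by p.length
decreasing_by
  have hne : p ≠ [] := pvFind_nonneg_ne_nil p (by omega)
  have : 0 < p.length := List.length_pos_iff.mpr hne
  simp [List.length_drop]; omega

def path_matches_pattern_py_alt (path : String) (pattern : String) : Bool :=
  pvBLoop path.toList pattern.toList

-- ===== PRECONDITION & SPEC =====
def Spec_path_matches_pattern_py (path : String) (pattern : String) (out : Bool) : Prop := out = path_matches_pattern_py_alt path pattern
instance (path : String) (pattern : String) (out : Bool) : Decidable (Spec_path_matches_pattern_py path pattern out) := by unfold Spec_path_matches_pattern_py; infer_instance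

-- ===== CLAIM (what is proved, stated in full; the proofs are below) =====
def Claim_equal_path_matches_pattern_py : Prop := ∀ (path : String) (pattern : String), Dom_path_matches_pattern_py path pattern → Spec_path_matches_pattern_py path pattern (path_matches_pattern_py path pattern)

-- ===== LEMMAS AND PROOFS =====

-- clean structural model of s.split("/")
def pvSp : List Char → List (List Char)
  | [] => [[]]
  | c :: rest =>
      if c = '/' then [] :: pvSp rest
      else
        match pvSp rest with
        | [] => [[c]]
        | s :: ss => (c :: s) :: ss

lemma pvSp_ne_nil (l : List Char) : pvSp l ≠ [] := by
  cases l with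
  | nil => simp [pvSp]
  | cons c rest =>
    simp only [pvSp]
    split_ifs
    · simp
    · cases h : pvSp rest <;> simp

lemma pvFind_go_single (l : List Char) (k : Nat) :
    PySem.Chars.find.go ['/'] l k =
      match l.findIdx? (· == '/') with
      | none => -1
      | some i => ((k + i : Nat) : Int) := by
  induction l generalizing k with
  | nil => simp [PySem.Chars.find.go]
  | cons c rest ih =>
    rw [PySem.Chars.find.go]
    by_cases hc : c = '/'
    · subst hc
      simp [List.findIdx?_cons, List.isPrefixOf]
    · have hpre : List.isPrefixOf ['/'] (c :: rest) = false := by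
        simp [List.isPrefixOf]; intro h; exact absurd h.symm hc
      rw [hpre]
      simp only [Bool.false_eq_true, if_false]
      rw [ih (k + 1)]
      have : (c == '/') = false := by simp [hc]
      rw [List.findIdx?_cons, this]
      cases h : rest.findIdx? (· == '/') <;> (simp [h]; try ring)

lemma pvFind_single (l : List Char) :
    PySem.Chars.find l ['/'] =
      match l.findIdx? (· == '/') with
      | none => -1
      | some i => (i : Int) := by
  rw [PySem.Chars.find, pvFind_go_single]
  cases h : l.findIdx? (· == '/') <;> simp

lemma pvSp_of_none {l : List Char} (h : l.findIdx? (· == '/') = none) : pvSp l = [l] := by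
  induction l with
  | nil => simp [pvSp]
  | cons c rest ih =>
    rw [List.findIdx?_cons] at h
    by_cases hc : c = '/'
    · simp [hc] at h
    · have : (c == '/') = false := by simp [hc]
      rw [this] at h; simp only [Bool.false_eq_true, if_false] at h
      have hr : rest.findIdx? (· == '/') = none := by
        cases hh : rest.findIdx? (· == '/') <;> simp [hh] at h ⊢
      rw [pvSp]
      simp [hc, ih hr]

lemma pvSp_of_some {l : List Char} {i : Nat} (h : l.findIdx? (· == '/') = some i) :
    pvSp l = l.take i :: pvSp (l.drop (i + 1)) := by
  induction l generalizing i with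
  | nil => simp at h
  | cons c rest ih =>
    rw [List.findIdx?_cons] at h
    by_cases hc : c = '/'
    · simp [hc] at h
      subst h
      simp [pvSp, hc]
    · have hb : (c == '/') = false := by simp [hc]
      rw [hb] at h; simp only [Bool.false_eq_true, if_false] at h
      cases hh : rest.findIdx? (· == '/') with
      | none => rw [hh] at h; simp at h
      | some j =>
        rw [hh] at h; simp at h
        obtain ⟨rfl⟩ : i = j + 1 := by omega
        rw [pvSp]
        simp only [hc, if_false]
        rw [ih hh]
        simp [List.take_succ_cons, List.drop_succ_cons]

lemma pvSplitOn_go_spec (l : List Char) :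
    ∀ (fuel : Nat) (cur : List Char) (acc : List (List Char)), l.length < fuel →
    PySem.Chars.splitOn.go ['/'] fuel l cur acc =
      acc.reverse ++
        (match pvSp l with
         | [] => []
         | s :: ss => (cur.reverse ++ s) :: ss) := by
  induction l with
  | nil =>
    intro fuel cur acc hf
    obtain ⟨f, rfl⟩ : ∃ f, fuel = f + 1 := ⟨fuel - 1, by omega⟩
    rw [PySem.Chars.splitOn.go]
    simp [pvSp]
    omega
  | cons c rest ih =>
    intro fuel cur acc hf
    obtain ⟨f, rfl⟩ : ∃ f, fuel = f + 1 := ⟨fuel - 1, by omega⟩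
    rw [PySem.Chars.splitOn.go]
    by_cases hc : c = '/'
    · subst hc
      have hpre : List.isPrefixOf ['/'] ('/' :: rest) = true := by simp [List.isPrefixOf]
      rw [hpre]
      simp only [if_true]
      have hd : List.drop (['/'] : List Char).length ('/' :: rest) = rest := rfl
      rw [hd, ih f [] (cur.reverse :: acc) (by simp at hf ⊢; omega)]
      rw [pvSp]
      simp only [if_true]
      cases h : pvSp rest with
      | nil => exact absurd h (pvSp_ne_nil rest)
      | cons s ss => simp
    · have hpre : List.isPrefixOf ['/'] (c :: rest) = false := by
        simp [List.isPrefixOf]; intro h; exact absurd h.symm hc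
      rw [hpre]
      simp only [Bool.false_eq_true, if_false]
      rw [ih f (c :: cur) acc (by simp at hf ⊢; omega)]
      rw [pvSp]
      simp only [hc, if_false]
      cases h : pvSp rest with
      | nil => exact absurd h (pvSp_ne_nil rest)
      | cons s ss => simp

lemma pvSplitOn_eq_pvSp (l : List Char) : PySem.Chars.splitOn l ['/'] = pvSp l := by
  rw [PySem.Chars.splitOn, pvSplitOn_go_spec l (l.length + 1) [] [] (by omega)]
  cases h : pvSp l with
  | nil => exact absurd h (pvSp_ne_nil l)
  | cons s ss => simp

lemma pvALoop_cons (a b : List Char) (r : List (List Char × List Char)) :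
    pvALoop ((a, b) :: r) = (pvSegOk a b && pvALoop r) := by
  rw [pvALoop, pvSegOk]
  by_cases hp : (PySem.Chars.startswith b ['{'] && PySem.Chars.endswith b ['}']) = true
  · simp [hp]
  · simp only [Bool.not_eq_true] at hp
    by_cases he : a = b <;> simp [hp, he]

lemma pvMain : ∀ (n : Nat) (p q : List Char), p.length ≤ n →
    pvBLoop p q =
      (if (pvSp p).length ≠ (pvSp q).length then false
       else pvALoop ((pvSp p).zip (pvSp q))) := by
  intro n
  induction n with
  | zero =>
    intro p q hp
    have : p = [] := List.length_eq_zero_iff.mp (by omega)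
    subst this
    rw [pvBLoop]
    simp only [pvFind_single, List.findIdx?_nil]
    cases hq : q.findIdx? (· == '/') with
    | none =>
      rw [pvSp_of_none hq]
      simp [pvSp, pvALoop_cons, pvSegOk, pvALoop]
    | some j =>
      rw [pvSp_of_some hq]
      have h2 : (pvSp (q.drop (j+1))).length ≥ 1 := by
        cases h : pvSp (q.drop (j+1)) with
        | nil => exact absurd h (pvSp_ne_nil _)
        | cons s ss => simp
      simp [pvSp]
      intro h'
      exact absurd h' (pvSp_ne_nil _)
  | succ n ih =>
    intro p q hp
    rw [pvBLoop]
    simp only [pvFind_single]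
    cases hpf : p.findIdx? (· == '/') with
    | none =>
      cases hqf : q.findIdx? (· == '/') with
      | none =>
        rw [pvSp_of_none hpf, pvSp_of_none hqf]
        simp [pvALoop_cons]
        intro _
        rfl
      | some j =>
        rw [pvSp_of_none hpf, pvSp_of_some hqf]
        have h2 : (pvSp (q.drop (j+1))).length ≥ 1 := by
          cases h : pvSp (q.drop (j+1)) with
          | nil => exact absurd h (pvSp_ne_nil _)
          | cons s ss => simp
        simp
        intro h'
        exact absurd h' (pvSp_ne_nil _)
    | some i =>
      cases hqf : q.findIdx? (· == '/') with
      | none =>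
        rw [pvSp_of_some hpf, pvSp_of_none hqf]
        have h2 : (pvSp (p.drop (i+1))).length ≥ 1 := by
          cases h : pvSp (p.drop (i+1)) with
          | nil => exact absurd h (pvSp_ne_nil _)
          | cons s ss => simp
        simp
        intro h'
        exact absurd h' (pvSp_ne_nil _)
      | some j =>
        rw [pvSp_of_some hpf, pvSp_of_some hqf]
        have hplen : p.length ≥ 1 := by
          have := List.findIdx?_eq_some_iff_findIdx_eq.mp hpf
          cases p <;> simp_all
        have hrec := ih (p.drop (i + 1)) (q.drop (j + 1)) (by simp; omega)
        simp only [Int.toNat_natCast] at *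
        rw [hrec]
        rw [List.zip_cons_cons, pvALoop_cons]
        have hi : ¬((i : Int) < 0) := by omega
        have hj : ¬((j : Int) < 0) := by omega
        by_cases hl : (pvSp (p.drop (i+1))).length = (pvSp (q.drop (j+1))).length
        · simp only [hl]
          by_cases hs : pvSegOk (p.take i) (q.take j) = true <;>
            (simp [hs, hi, hj]; try exact fun _ => hl)
        · simp [hl, hi, hj]

-- ===== VERDICT (by name: the statement is the Claim_ definition above) =====
theorem path_matches_pattern_py_spec : Claim_equal_path_matches_pattern_py := by
  intro path pattern _
  unfold Spec_path_matches_pattern_py path_matches_pattern_py path_matches_pattern_py_alt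
  simp only [pvSplitOn_eq_pvSp]
  rw [pvMain path.toList.length path.toList pattern.toList (le_refl _)]
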